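-- pv_equiv track=rewrite | github.com/Y-Sui/swe-factory-dev | data_collection/collect/build_dataset.py | _split_patch_by_file
-- ===== SOURCE A (Python) =====
-- def _split_patch_by_file(patch: str) -> dict[str, str]:
--     """Split a unified diff string into per-file diffs, keyed by filename."""
--     files = {}
--     current_file = None
--     current_lines = []
--
--     for line in patch.split("\n"):
--         if line.startswith("diff --git a/"):
--             if current_file is not None:
--                 files[current_file] = "\n".join(current_lines)
--             parts = line.split(" b/")
--             current_file = parts[-1].strip() if len(parts) >= 2 else None
--             current_lines = [line]
--         elif current_file is not None:
--             current_lines.append(line)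
--
--     if current_file is not None:
--         files[current_file] = "\n".join(current_lines)
--
--     return files
-- ===== SOURCE B (Python) =====
-- _HDR = "diff --git a/"
--
--
-- def _segments(lines):
--     """Collect (header, segment-lines) pairs by scanning the lines back to front."""
--     segs = []
--     cur = []
--     for line in reversed(lines):
--         if line.startswith(_HDR):
--             segs.append((line, [line] + cur[::-1]))
--             cur = []
--         else:
--             cur.append(line)
--     segs.reverse()
--     return segs
--
--
-- def _split_patch_by_file(patch: str) -> dict[str, str]:
--     """Split a unified diff string into per-file diffs, keyed by filename."""
--     files = {}
--     for header, seg in _segments(patch.split("\n")):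
--         parts = header.split(" b/")
--         if len(parts) >= 2:
--             files[parts[-1].strip()] = "\n".join(seg)
--     return files
-- ===== Notes on version B (the rewrite author's own statement) =====
-- stated objective: alternative
-- what changed: A streams forward with a current-file/current-lines accumulator flushed at each next header; B first segments the line list in a single back-to-front pass (building each segment behind its header), then inserts each segment's filename and joined text into the dict in a second pass.
import Mathlib
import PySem

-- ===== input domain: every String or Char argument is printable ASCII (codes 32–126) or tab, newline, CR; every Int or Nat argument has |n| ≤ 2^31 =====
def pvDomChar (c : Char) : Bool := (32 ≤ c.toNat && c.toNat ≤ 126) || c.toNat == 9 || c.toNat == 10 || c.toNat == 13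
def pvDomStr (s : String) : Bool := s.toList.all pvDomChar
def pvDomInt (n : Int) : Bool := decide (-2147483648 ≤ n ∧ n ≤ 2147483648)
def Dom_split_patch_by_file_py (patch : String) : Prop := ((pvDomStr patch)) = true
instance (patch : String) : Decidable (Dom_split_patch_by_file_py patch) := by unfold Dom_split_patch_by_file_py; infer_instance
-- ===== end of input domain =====

-- B replaces A's stateful streaming accumulator (flush-on-next-header) with a back-to-front
-- segmentation pass followed by one pass inserting each segment (objective: alternative).

-- ===== PORT A =====
-- the filename a header line yields: some name iff the line splits on " b/" into ≥ 2 parts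
-- (the literal 'parts = line.split(" b/"); parts[-1].strip()' step, which A and B both
--  perform verbatim; split? is some because the separator " b/" is nonempty)
def pvNameOf (line : String) : Option String :=
  let parts := (PySem.Str.split? line " b/").getD []
  if 2 ≤ parts.length then (PySem.List.pyGet? parts (-1)).map PySem.Str.strip else none

def pvStepA (st : PySem.Dict String String × Option String × List String) (line : String) :
    PySem.Dict String String × Option String × List String :=
  if PySem.Str.startswith line "diff --git a/" then
    let files := match st.2.1 with
      | some f => st.1.insert f (PySem.Str.join "\n" st.2.2)
      | none => st.1
    (files, pvNameOf line, [line])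
  else match st.2.1 with
    | some f => (st.1, some f, st.2.2 ++ [line])
    | none => (st.1, none, st.2.2)

def split_patch_by_file_py (patch : String) : List (String × String) :=
  let st := ((PySem.Str.split? patch "\n").getD []).foldl pvStepA (PySem.Dict.empty, none, [])
  (match st.2.1 with
    | some f => st.1.insert f (PySem.Str.join "\n" st.2.2)
    | none => st.1).items

-- ===== PORT B =====
def pvIsHdr (l : String) : Bool := PySem.Str.startswith l "diff --git a/"

-- one step of B's 'for line in reversed(lines)' loop; state = (segs in reverse, cur);
-- Python's cur[::-1] is List.reverse
def pvStepB (line : String) (st : List (String × List String) × List String) :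
    List (String × List String) × List String :=
  if pvIsHdr line then (st.1 ++ [(line, line :: st.2.reverse)], [])
  else (st.1, st.2 ++ [line])

def pvInsB (files : PySem.Dict String String) (hs : String × List String) :
    PySem.Dict String String :=
  match pvNameOf hs.1 with
  | some n => files.insert n (PySem.Str.join "\n" hs.2)
  | none => files

def split_patch_by_file_py_alt (patch : String) : List (String × String) :=
  let lines := (PySem.Str.split? patch "\n").getD []
  let segs := (lines.foldr pvStepB ([], [])).1.reverse
  (segs.foldl pvInsB PySem.Dict.empty).items

-- ===== PRECONDITION & SPEC =====
def Spec_split_patch_by_file_py (patch : String) (out : List (String × String)) : Prop := out = split_patch_by_file_py_alt patch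
instance (patch : String) (out : List (String × String)) : Decidable (Spec_split_patch_by_file_py patch out) := by unfold Spec_split_patch_by_file_py; infer_instance

-- ===== CLAIM (what is proved, stated in full; the proofs are below) =====
def Claim_equal_split_patch_by_file_py : Prop := ∀ (patch : String), Dom_split_patch_by_file_py patch → Spec_split_patch_by_file_py patch (split_patch_by_file_py patch)

-- ===== LEMMAS AND PROOFS =====

-- finalization of A's loop state (the trailing flush)
def pvFin (st : PySem.Dict String String × Option String × List String) :
    PySem.Dict String String :=
  match st.2.1 with
  | some f => st.1.insert f (PySem.Str.join "\n" st.2.2)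
  | none => st.1

-- proof-only front-to-back characterisation of the segment list
def pvSegs : List String → List (String × List String)
  | [] => []
  | head :: rest =>
    if pvIsHdr head then
      let body := rest.takeWhile (fun x => !pvIsHdr x)
      (head, head :: body) :: pvSegs (rest.drop body.length)
    else pvSegs rest
  termination_by lines => lines.length
  decreasing_by
    · simp only [List.length_drop, List.length_cons]; omega
    · simp only [List.length_cons]; omega

theorem pvSegs_nil : pvSegs [] = [] := by rw [pvSegs.eq_def]

theorem pvSegs_cons_hdr (l : String) (rest : List String) (h : pvIsHdr l = true) :
    pvSegs (l :: rest) =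
      (l, l :: rest.takeWhile (fun x => !pvIsHdr x)) ::
        pvSegs (rest.drop (rest.takeWhile (fun x => !pvIsHdr x)).length) := by
  rw [pvSegs.eq_def]; simp [h]

theorem pvSegs_cons_nothdr (l : String) (rest : List String) (h : pvIsHdr l = false) :
    pvSegs (l :: rest) = pvSegs rest := by
  rw [pvSegs.eq_def]; simp [h]

-- the segmentation ignores a leading run of non-header lines
theorem pvSegs_drop (xs : List String) :
    pvSegs (xs.drop (xs.takeWhile (fun x => !pvIsHdr x)).length) = pvSegs xs := by
  induction xs with
  | nil => rfl
  | cons x xs ih =>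
    cases h : pvIsHdr x with
    | true => simp [h]
    | false =>
      rw [pvSegs_cons_nothdr x xs h]
      simp only [List.takeWhile_cons, h, Bool.not_false, if_true, List.length_cons,
        List.drop_succ_cons]
      exact ih

-- B's backward pass computes the segments (reversed) and the reversed non-header prefix
theorem pvFoldrB (lines : List String) :
    lines.foldr pvStepB ([], []) =
      ((pvSegs lines).reverse, (lines.takeWhile (fun x => !pvIsHdr x)).reverse) := by
  induction lines with
  | nil => simp [pvSegs_nil]
  | cons l rest ih =>
    rw [List.foldr_cons, ih]
    cases h : pvIsHdr l with
    | true =>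
      simp only [pvStepB, h, if_true, List.reverse_reverse]
      rw [pvSegs_cons_hdr l rest h, ← pvSegs_drop rest]
      simp [h]
    | false =>
      simp only [pvStepB, h, Bool.false_eq_true, if_false]
      rw [pvSegs_cons_nothdr l rest h]
      simp [h]

-- main invariant: A's fold from either loop state equals the segment fold
theorem pvMain (lines : List String) :
    (∀ files cls, pvFin (lines.foldl pvStepA (files, none, cls)) =
        (pvSegs lines).foldl pvInsB files) ∧
    (∀ files f cls, pvFin (lines.foldl pvStepA (files, some f, cls)) =
        (pvSegs (lines.drop (lines.takeWhile (fun x => !pvIsHdr x)).length)).foldl pvInsB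
          (files.insert f (PySem.Str.join "\n"
            (cls ++ lines.takeWhile (fun x => !pvIsHdr x))))) := by
  induction lines with
  | nil =>
    constructor
    · intro files cls; simp [pvFin, pvSegs_nil]
    · intro files f cls; simp [pvFin, pvSegs_nil]
  | cons l rest ih =>
    constructor
    · intro files cls
      rw [List.foldl_cons]
      cases h : pvIsHdr l with
      | true =>
        have hstep : pvStepA (files, none, cls) l = (files, pvNameOf l, [l]) := by
          have h' : PySem.Str.startswith l "diff --git a/" = true := h
          simp only [pvStepA, h', if_true]
        rw [hstep, pvSegs_cons_hdr l rest h, List.foldl_cons]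
        cases hn : pvNameOf l with
        | some n =>
          rw [ih.2 files n [l]]
          simp [pvInsB, hn]
        | none =>
          rw [ih.1 files [l], ← pvSegs_drop rest]
          simp [pvInsB, hn]
      | false =>
        have hstep : pvStepA (files, none, cls) l = (files, none, cls) := by
          have h' : PySem.Str.startswith l "diff --git a/" = false := h
          simp only [pvStepA, h', Bool.false_eq_true, if_false]
        rw [hstep, pvSegs_cons_nothdr l rest h]
        exact ih.1 files cls
    · intro files f cls
      rw [List.foldl_cons]
      cases h : pvIsHdr l with
      | true =>
        simp only [List.takeWhile_cons, h, Bool.not_true, Bool.false_eq_true, if_false,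
          List.length_nil, List.drop_zero, List.append_nil]
        have hstep : pvStepA (files, some f, cls) l =
            (files.insert f (PySem.Str.join "\n" cls), pvNameOf l, [l]) := by
          have h' : PySem.Str.startswith l "diff --git a/" = true := h
          simp only [pvStepA, h', if_true]
        rw [hstep, pvSegs_cons_hdr l rest h, List.foldl_cons]
        cases hn : pvNameOf l with
        | some n =>
          rw [ih.2 _ n [l]]
          simp [pvInsB, hn]
        | none =>
          rw [ih.1 _ [l], ← pvSegs_drop rest]
          simp [pvInsB, hn]
      | false =>
        simp only [List.takeWhile_cons, h, Bool.not_false, if_true, List.length_cons,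
          List.drop_succ_cons]
        have hstep : pvStepA (files, some f, cls) l = (files, some f, cls ++ [l]) := by
          have h' : PySem.Str.startswith l "diff --git a/" = false := h
          simp only [pvStepA, h', Bool.false_eq_true, if_false]
        rw [hstep, ih.2 files f (cls ++ [l])]
        simp

-- ===== VERDICT (by name: the statement is the Claim_ definition above) =====
theorem split_patch_by_file_py_spec : Claim_equal_split_patch_by_file_py := by
  intro patch _
  show (pvFin (((PySem.Str.split? patch "\n").getD []).foldl pvStepA
      (PySem.Dict.empty, none, []))).items =
    (((((PySem.Str.split? patch "\n").getD []).foldr pvStepB ([], [])).1.reverse).foldl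
      pvInsB PySem.Dict.empty).items
  rw [pvFoldrB ((PySem.Str.split? patch "\n").getD [])]
  simp only [List.reverse_reverse]
  exact congrArg PySem.Dict.items
    ((pvMain ((PySem.Str.split? patch "\n").getD [])).1 PySem.Dict.empty [])
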